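-- pv_equiv track=rewrite | github.com/lpullela/mi3_anemia | one_hot.py | age
-- ===== SOURCE A (Python) =====
-- def age( age_col ):
-- 	bins = [ 20 ]
-- 	start = 20
-- 	while start < 90:
-- 		bins.append( start + 5 )
-- 		start = start + 5
--
-- 	one_hot_array = []
--
-- 	for element in age_col:
-- 		app = True
-- 		for i in range ( len( bins )):
-- 			if int( element ) < bins[ i ]:
-- 				one_hot_array.append( i )
-- 				app = False
-- 				break
-- 		if app:
-- 			one_hot_array.append( len( bins ))
--
-- 	return one_hot_array
-- ===== SOURCE B (Python) =====
-- def age(age_col):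
--     # closed-form bucket index instead of scanning the bins list
--     return [max(0, min(15, (int(element) - 20) // 5 + 1)) for element in age_col]
-- ===== Notes on version B (the rewrite author's own statement) =====
-- stated objective: simpler
-- what changed: Replaces building the 5-year bins list and linearly scanning it per element with a clamped closed-form floor-division formula in a single comprehension.
import Mathlib
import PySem

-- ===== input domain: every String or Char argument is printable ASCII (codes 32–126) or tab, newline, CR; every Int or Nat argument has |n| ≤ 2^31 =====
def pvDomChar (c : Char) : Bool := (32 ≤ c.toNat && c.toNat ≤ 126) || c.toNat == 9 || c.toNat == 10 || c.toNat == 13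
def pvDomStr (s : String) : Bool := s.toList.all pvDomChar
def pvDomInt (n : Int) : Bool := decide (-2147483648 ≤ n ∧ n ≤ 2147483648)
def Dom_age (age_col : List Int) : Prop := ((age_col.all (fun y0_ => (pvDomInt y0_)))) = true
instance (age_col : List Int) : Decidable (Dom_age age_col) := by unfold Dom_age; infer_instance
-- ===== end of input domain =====

-- B replaces A's bins-list construction and per-element linear scan by a clamped
-- closed-form floor-division formula; return values are identical on all inputs.

-- ===== PORT A =====
-- while start < 90: bins.append(start + 5); start = start + 5
def ageBinsLoop (bins : List Int) (start : Int) : List Int :=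
  if start < 90 then ageBinsLoop (bins ++ [start + 5]) (start + 5) else bins
termination_by (90 - start).toNat
decreasing_by omega

-- for i in range(len(bins)): if int(element) < bins[i]: append i; break — else append len(bins)
def ageScan (x : Int) (bins : List Int) (i : Nat) : Int :=
  if h : i < bins.length then
    if x < bins[i] then (i : Int) else ageScan x bins (i + 1)
  else (bins.length : Int)
termination_by bins.length - i

def age (age_col : List Int) : List Int :=
  let bins := ageBinsLoop [20] 20
  age_col.foldl (fun acc element => acc ++ [ageScan element bins 0]) []

-- ===== PORT B =====
def age_alt (age_col : List Int) : List Int :=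
  age_col.map (fun element => max 0 (min 15 (PySem.Int.floordiv (element - 20) 5 + 1)))

-- ===== PRECONDITION & SPEC =====
def Spec_age (age_col : List Int) (out : List Int) : Prop := out = age_alt age_col
instance (age_col : List Int) (out : List Int) : Decidable (Spec_age age_col out) := by unfold Spec_age; infer_instance

-- ===== CLAIM (what is proved, stated in full; the proofs are below) =====
def Claim_equal_age : Prop := ∀ (age_col : List Int), Dom_age age_col → Spec_age age_col (age age_col)

-- ===== LEMMAS AND PROOFS =====

lemma ageBins_eval : ageBinsLoop [20] 20 =
    [20, 25, 30, 35, 40, 45, 50, 55, 60, 65, 70, 75, 80, 85, 90] := by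
  rw [ageBinsLoop]; norm_num
  rw [ageBinsLoop]; norm_num
  rw [ageBinsLoop]; norm_num
  rw [ageBinsLoop]; norm_num
  rw [ageBinsLoop]; norm_num
  rw [ageBinsLoop]; norm_num
  rw [ageBinsLoop]; norm_num
  rw [ageBinsLoop]; norm_num
  rw [ageBinsLoop]; norm_num
  rw [ageBinsLoop]; norm_num
  rw [ageBinsLoop]; norm_num
  rw [ageBinsLoop]; norm_num
  rw [ageBinsLoop]; norm_num
  rw [ageBinsLoop]; norm_num
  rw [ageBinsLoop]; norm_num

lemma ageScan_shift_aux (x b : Int) (bs : List Int) :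
    ∀ k i, bs.length - i ≤ k → ageScan x (b :: bs) (i + 1) = ageScan x bs i + 1 := by
  intro k
  induction k with
  | zero =>
      intro i hk
      have h : ¬ i < bs.length := by omega
      have h' : ¬ i + 1 < (b :: bs).length := by simp; omega
      conv_lhs => rw [ageScan]
      conv_rhs => rw [ageScan]
      rw [dif_neg h', dif_neg h]
      push_cast [List.length_cons]; ring
  | succ k ih =>
      intro i hk
      conv_lhs => rw [ageScan]
      conv_rhs => rw [ageScan]
      by_cases h : i < bs.length
      · have h' : i + 1 < (b :: bs).length := by simp; omega
        rw [dif_pos h', dif_pos h]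
        have hg : (b :: bs)[i + 1]'h' = bs[i]'h := by simp
        rw [hg]
        split_ifs with hx
        · push_cast; ring
        · exact ih (i + 1) (by omega)
      · have h' : ¬ i + 1 < (b :: bs).length := by simp; omega
        rw [dif_neg h', dif_neg h]
        push_cast [List.length_cons]; ring

lemma ageScan_cons (x b : Int) (bs : List Int) :
    ageScan x (b :: bs) 0 = if x < b then 0 else ageScan x bs 0 + 1 := by
  rw [ageScan]
  simp only [List.length_cons, Nat.zero_lt_succ, dif_pos, List.getElem_cons_zero]
  split_ifs with hx
  · rfl
  · exact ageScan_shift_aux x b bs bs.length 0 (by omega)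

lemma ageScan_nil (x : Int) : ageScan x [] 0 = 0 := by
  rw [ageScan]; simp

set_option maxHeartbeats 1600000 in
lemma ageScan_formula (x : Int) :
    ageScan x [20, 25, 30, 35, 40, 45, 50, 55, 60, 65, 70, 75, 80, 85, 90] 0 =
      max 0 (min 15 (PySem.Int.floordiv (x - 20) 5 + 1)) := by
  rw [PySem.Int.floordiv_eq_ediv_of_pos (by norm_num)]
  rw [ageScan_cons]
  rw [ageScan_cons]
  rw [ageScan_cons]
  rw [ageScan_cons]
  rw [ageScan_cons]
  rw [ageScan_cons]
  rw [ageScan_cons]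
  rw [ageScan_cons]
  rw [ageScan_cons]
  rw [ageScan_cons]
  rw [ageScan_cons]
  rw [ageScan_cons]
  rw [ageScan_cons]
  rw [ageScan_cons]
  rw [ageScan_cons]
  rw [ageScan_nil]
  rcases lt_or_ge x 20 with h0 | h0
  · rw [if_pos h0]; omega
  · rw [if_neg (not_lt.mpr h0)]
    rcases lt_or_ge x 25 with h1 | h1
    · rw [if_pos h1]; omega
    · rw [if_neg (not_lt.mpr h1)]
      rcases lt_or_ge x 30 with h2 | h2
      · rw [if_pos h2]; omega
      · rw [if_neg (not_lt.mpr h2)]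
        rcases lt_or_ge x 35 with h3 | h3
        · rw [if_pos h3]; omega
        · rw [if_neg (not_lt.mpr h3)]
          rcases lt_or_ge x 40 with h4 | h4
          · rw [if_pos h4]; omega
          · rw [if_neg (not_lt.mpr h4)]
            rcases lt_or_ge x 45 with h5 | h5
            · rw [if_pos h5]; omega
            · rw [if_neg (not_lt.mpr h5)]
              rcases lt_or_ge x 50 with h6 | h6
              · rw [if_pos h6]; omega
              · rw [if_neg (not_lt.mpr h6)]
                rcases lt_or_ge x 55 with h7 | h7
                · rw [if_pos h7]; omega
                · rw [if_neg (not_lt.mpr h7)]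
                  rcases lt_or_ge x 60 with h8 | h8
                  · rw [if_pos h8]; omega
                  · rw [if_neg (not_lt.mpr h8)]
                    rcases lt_or_ge x 65 with h9 | h9
                    · rw [if_pos h9]; omega
                    · rw [if_neg (not_lt.mpr h9)]
                      rcases lt_or_ge x 70 with h10 | h10
                      · rw [if_pos h10]; omega
                      · rw [if_neg (not_lt.mpr h10)]
                        rcases lt_or_ge x 75 with h11 | h11
                        · rw [if_pos h11]; omega
                        · rw [if_neg (not_lt.mpr h11)]
                          rcases lt_or_ge x 80 with h12 | h12
                          · rw [if_pos h12]; omega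
                          · rw [if_neg (not_lt.mpr h12)]
                            rcases lt_or_ge x 85 with h13 | h13
                            · rw [if_pos h13]; omega
                            · rw [if_neg (not_lt.mpr h13)]
                              rcases lt_or_ge x 90 with h14 | h14
                              · rw [if_pos h14]; omega
                              · rw [if_neg (not_lt.mpr h14)]
                                omega

lemma foldl_append_map (f : Int → Int) (l : List Int) (acc : List Int) :
    l.foldl (fun acc e => acc ++ [f e]) acc = acc ++ l.map f := by
  induction l generalizing acc with
  | nil => simp
  | cons h t ih => simp [List.foldl, ih]

-- ===== VERDICT (by name: the statement is the Claim_ definition above) =====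
theorem age_spec : Claim_equal_age := by
  intro age_col _
  unfold Spec_age age age_alt
  rw [ageBins_eval, foldl_append_map]
  simp only [List.nil_append]
  exact List.map_congr_left (fun x _ => ageScan_formula x)
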